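-- pv_equiv track=rewrite | github.com/iridescent99/codeforces | 1200/327A.py | flipping_game
-- ===== SOURCE A (Python) =====
-- def flipping_game(arr, n):
--     cum_sum = [0] * (n+1)
--     cum_sum[0] = arr[0]
--     total_ones = sum(arr)
--     for i in range(1, n+1):
--         cum_sum[i] = cum_sum[i-1] + arr[i-1]
--     max_sum = 0
--     for i in range(n):
--         for j in range(i, n):
--             ones_in_range = cum_sum[j + 1] - cum_sum[i]
--             length = j - i + 1
--             zeros_in_range = length - ones_in_range
--
--             current_ones = total_ones - ones_in_range + zeros_in_range
--
--             max_sum = max(max_sum, current_ones)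
--     return max_sum
-- ===== SOURCE B (Python) =====
-- def flipping_game(arr, n):
--     # Kadane's algorithm on the gain values (0 -> +1, 1 -> -1) of the first n
--     # elements; O(n) instead of A's O(n^2) double loop over all subarrays.
--     total = sum(arr)
--     cur = 0
--     best = None
--     for i in range(n):
--         g = 1 - 2 * arr[i]
--         cur = max(cur + g, g)
--         best = cur if best is None else max(best, cur)
--     if best is None:
--         return 0
--     return max(0, total + best)
-- ===== Notes on version B (the rewrite author's own statement) =====
-- stated objective: faster
-- what changed: Replaces A's O(n^2) double loop over all subarrays (with a prefix-sum table) by a single-pass Kadane maximisation of the flip gain (zero contributes +1, one contributes -1) over the first n elements.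
import Mathlib
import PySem

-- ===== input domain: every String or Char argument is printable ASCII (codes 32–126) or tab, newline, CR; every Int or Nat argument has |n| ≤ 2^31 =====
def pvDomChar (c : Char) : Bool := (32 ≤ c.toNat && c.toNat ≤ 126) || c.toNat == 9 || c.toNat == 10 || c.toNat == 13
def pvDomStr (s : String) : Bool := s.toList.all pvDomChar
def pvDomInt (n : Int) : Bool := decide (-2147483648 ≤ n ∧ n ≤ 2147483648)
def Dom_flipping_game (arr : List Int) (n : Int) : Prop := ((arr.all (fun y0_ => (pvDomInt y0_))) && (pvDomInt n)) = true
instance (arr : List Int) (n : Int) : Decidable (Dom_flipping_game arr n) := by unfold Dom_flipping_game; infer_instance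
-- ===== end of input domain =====

-- B replaces A's O(n^2) scan over all subarrays (via a prefix-sum table) by a
-- single-pass Kadane maximisation of the flip gain (0 -> +1, 1 -> -1); objective: faster.


-- ===== PORT A =====
def flipping_game (arr : List Int) (n : Int) : Int :=
  let cum0 : List Int := List.replicate ((n+1).toNat) 0
  let cum1 := PySem.List.pySetD cum0 0 (PySem.List.pyGetD arr 0 0)
  let total_ones := arr.sum
  let cum := (PySem.List.pyRange 1 (n+1) 1).foldl
      (fun c i => PySem.List.pySetD c i
        (PySem.List.pyGetD c (i-1) 0 + PySem.List.pyGetD arr (i-1) 0)) cum1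
  (PySem.List.pyRange 0 n 1).foldl (fun m i =>
    (PySem.List.pyRange i n 1).foldl (fun m j =>
      let ones_in_range := PySem.List.pyGetD cum (j+1) 0 - PySem.List.pyGetD cum i 0
      let length := j - i + 1
      let zeros_in_range := length - ones_in_range
      let current_ones := total_ones - ones_in_range + zeros_in_range
      max m current_ones) m) 0

-- ===== PORT B =====
def flipping_game_alt (arr : List Int) (n : Int) : Int :=
  let total := arr.sum
  let st := (PySem.List.pyRange 0 n 1).foldl
      (fun (s : Int × Option Int) i =>
        let g := 1 - 2 * PySem.List.pyGetD arr i 0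
        let cur := max (s.1 + g) g
        (cur, some (match s.2 with | none => cur | some b => max b cur)))
      ((0 : Int), (none : Option Int))
  match st.2 with
  | none => 0
  | some b => max 0 (total + b)

-- ===== PRECONDITION & SPEC =====
-- Pre_ excludes exactly the inputs where A raises IndexError: empty arr, negative n,
-- or n larger than len(arr).
def Pre_flipping_game (arr : List Int) (n : Int) : Prop :=
  arr ≠ [] ∧ 0 ≤ n ∧ n ≤ (arr.length : Int)
instance (arr : List Int) (n : Int) : Decidable (Pre_flipping_game arr n) := by
  unfold Pre_flipping_game; infer_instance

def pvWitness_flipping_game : List Int × Int := ([1, 0, 1], 3)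

def Spec_flipping_game (arr : List Int) (n : Int) (out : Int) : Prop := out = flipping_game_alt arr n
instance (arr : List Int) (n : Int) (out : Int) : Decidable (Spec_flipping_game arr n out) := by unfold Spec_flipping_game; infer_instance

-- ===== CLAIM (what is proved, stated in full; the proofs are below) =====
def Claim_equal_flipping_game : Prop := ∀ (arr : List Int) (n : Int), Dom_flipping_game arr n → Pre_flipping_game arr n → Spec_flipping_game arr n (flipping_game arr n)

-- ===== LEMMAS AND PROOFS =====

-- prefix sum of the first k elements
def pvPre (arr : List Int) (k : Nat) : Int := (arr.take k).sum

-- sum of the segment [i, j] (inclusive, Nat indices) of a list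
def pvSeg (L : List Int) (i j : Nat) : Int := ((L.drop i).take (j + 1 - i)).sum

-- the value A computes for the subarray [i, j]
def pvV (arr : List Int) (i j : Int) : Int :=
  arr.sum - (pvPre arr (j+1).toNat - pvPre arr i.toNat)
    + ((j - i + 1) - (pvPre arr (j+1).toNat - pvPre arr i.toNat))

-- Kadane step (the body of B's fold, on the gain value)
def pvStep (s : Int × Option Int) (g : Int) : Int × Option Int :=
  let cur := max (s.1 + g) g
  (cur, some (match s.2 with | none => cur | some b => max b cur))

lemma pvGsum (M : List Int) :
    (M.map (fun x => 1 - 2 * x)).sum = (M.length : Int) - 2 * M.sum := by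
  induction M with
  | nil => simp
  | cons x l ih => simp [ih]; ring

lemma pvSumTakeDrop (xs : List Int) (i k : Nat) :
    ((xs.drop i).take k).sum = (xs.take (i + k)).sum - (xs.take i).sum := by
  rw [List.take_add, List.sum_append]; ring

lemma pvCumAux (arr : List Int) (n : Int) (harr : arr ≠ []) (hn : 0 ≤ n)
    (hlen : n ≤ (arr.length : Int)) (m : Nat) (hm : (m : Int) ≤ n) :
    ((PySem.List.pyRange 1 (1 + (m : Int)) 1).foldl
        (fun c i => PySem.List.pySetD c i
          (PySem.List.pyGetD c (i-1) 0 + PySem.List.pyGetD arr (i-1) 0))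
        (PySem.List.pySetD (List.replicate ((n+1).toNat) (0:Int)) 0 (PySem.List.pyGetD arr 0 0))).length
      = (n+1).toNat ∧
    ∀ k : Nat, k ≤ m →
      PySem.List.pyGetD
        ((PySem.List.pyRange 1 (1 + (m : Int)) 1).foldl
          (fun c i => PySem.List.pySetD c i
            (PySem.List.pyGetD c (i-1) 0 + PySem.List.pyGetD arr (i-1) 0))
          (PySem.List.pySetD (List.replicate ((n+1).toNat) (0:Int)) 0 (PySem.List.pyGetD arr 0 0)))
        (k : Int) 0
      = arr.headD 0 + pvPre arr k := by
  induction m with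
  | zero =>
    rw [show (1 + ((0:Nat) : Int)) = 1 by norm_num, PySem.List.pyRange_one_eq_nil (le_refl 1)]
    simp only [List.foldl_nil]
    constructor
    · rw [PySem.List.length_pySetD]
      simp
    · intro k hk
      have hk0 : k = 0 := by omega
      subst hk0
      rw [show (0:Int) = ((0:Nat):Int) from rfl]
      rw [PySem.List.pyGetD_pySetD_natCast _ 0 0 _ _ (by simp; omega)]
      simp [pvPre]
      cases arr with
      | nil => exact absurd rfl harr
      | cons a l => simp [PySem.List.pyGetD_zero]
  | succ m ih =>
    have hm' : (m : Int) ≤ n := by push_cast at hm; omega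
    obtain ⟨ihlen, ihget⟩ := ih hm'
    have hrange : PySem.List.pyRange 1 (1 + ((m+1 : Nat) : Int)) 1
        = PySem.List.pyRange 1 (1 + (m : Int)) 1 ++ [1 + (m : Int)] := by
      rw [show (1 + ((m+1 : Nat) : Int)) = (1 + (m : Int)) + 1 by push_cast; ring]
      exact PySem.List.pyRange_one_succ_right (by omega)
    rw [hrange, List.foldl_append]
    simp only [List.foldl_cons, List.foldl_nil]
    set C := (PySem.List.pyRange 1 (1 + (m : Int)) 1).foldl
        (fun c i => PySem.List.pySetD c i
          (PySem.List.pyGetD c (i-1) 0 + PySem.List.pyGetD arr (i-1) 0))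
        (PySem.List.pySetD (List.replicate ((n+1).toNat) (0:Int)) 0 (PySem.List.pyGetD arr 0 0)) with hC
    have hmlt : m < arr.length := by omega
    have hstep : (1 + (m:Int)) - 1 = ((m : Nat) : Int) := by ring
    rw [hstep]
    have hidx : (1 + (m:Int)) = (((m+1 : Nat)) : Int) := by push_cast; ring
    rw [hidx]
    have hm1lt : m + 1 < (n+1).toNat := by omega
    constructor
    · rw [PySem.List.length_pySetD, ihlen]
    · intro k hk
      rw [PySem.List.pyGetD_pySetD_natCast C (m+1) k _ _ (by rw [ihlen]; omega)]
      by_cases hkm : k = m + 1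
      · subst hkm
        rw [if_pos (by norm_cast)]
        rw [ihget m (le_refl m)]
        rw [PySem.List.pyGetD_natCast]
        rw [List.getD_eq_getElem _ _ hmlt]
        have : pvPre arr (m+1) = pvPre arr m + arr[m] := by
          unfold pvPre
          rw [List.sum_take_succ _ _ hmlt]
        rw [this]
        ring
      · rw [if_neg (by intro h; exact hkm (by exact_mod_cast h))]
        exact ihget k (by omega)

lemma pvKadane (G : List Int) (hne : G ≠ []) :
    ∃ c b, G.foldl pvStep (0, none) = (c, some b) ∧
      (∃ i, i < G.length ∧ c = (G.drop i).sum) ∧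
      (∀ i, i < G.length → (G.drop i).sum ≤ c) ∧
      (∃ i j, i ≤ j ∧ j < G.length ∧ b = pvSeg G i j) ∧
      (∀ i j, i ≤ j → j < G.length → pvSeg G i j ≤ b) := by
  induction G using List.reverseRecOn with
  | nil => exact absurd rfl hne
  | append_singleton G y ih =>
    rw [List.foldl_append]
    by_cases hG : G = []
    · subst hG
      refine ⟨y, y, ?_, ⟨0, by simp, by simp⟩, ?_, ⟨0, 0, le_refl 0, by simp, by simp [pvSeg]⟩, ?_⟩
      · simp [pvStep]
      · intro i hi
        simp at hi
        subst hi
        simp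
      · intro i j hij hj
        simp at hj
        subst hj
        have : i = 0 := by omega
        subst this
        simp [pvSeg]
    · obtain ⟨c, b, hfold, ⟨i0, hi0, hc0⟩, hcub, ⟨i1, j1, hij1, hj1, hb1⟩, hbub⟩ := ih hG
      rw [hfold]
      have hlen : (G ++ [y]).length = G.length + 1 := by simp
      -- suffix sums of G ++ [y]
      have hdrop : ∀ i : Nat, i ≤ G.length → ((G ++ [y]).drop i).sum = (G.drop i).sum + y := by
        intro i hi
        rw [List.drop_append_of_le_length hi]
        simp
      -- segments of G ++ [y]
      have hseg_old : ∀ i j : Nat, i ≤ j → j < G.length → pvSeg (G ++ [y]) i j = pvSeg G i j := by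
        intro i j hij hj
        unfold pvSeg
        rw [List.drop_append_of_le_length (by omega)]
        rw [List.take_append_of_le_length (by simp [List.length_drop]; omega)]
      have hseg_last : ∀ i : Nat, i ≤ G.length → pvSeg (G ++ [y]) i G.length = (G.drop i).sum + y := by
        intro i hi
        unfold pvSeg
        rw [List.drop_append_of_le_length hi]
        rw [List.take_of_length_le (by simp [List.length_drop]; omega)]
        simp
      refine ⟨max (c + y) y, max b (max (c + y) y), rfl, ?_, ?_, ?_, ?_⟩
      · -- c' is some suffix sum
        rcases max_cases (c + y) y with ⟨he, _⟩ | ⟨he, _⟩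
        · exact ⟨i0, by omega, by rw [he, hdrop i0 (by omega), hc0]⟩
        · exact ⟨G.length, by omega, by rw [he, hdrop G.length (le_refl _)]; simp⟩
      · -- upper bound on suffix sums
        intro i hi
        rw [hlen] at hi
        rcases Nat.lt_or_ge i G.length with h | h
        · rw [hdrop i (by omega)]
          have := hcub i h
          omega
        · have hi' : i = G.length := by omega
          subst hi'
          rw [hdrop _ (le_refl _)]
          simp
      · -- b' is some segment sum
        rcases max_cases b (max (c + y) y) with ⟨he, _⟩ | ⟨he, _⟩
        · exact ⟨i1, j1, hij1, by omega, by rw [he, hseg_old i1 j1 hij1 hj1, hb1]⟩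
        · rcases max_cases (c + y) y with ⟨he2, _⟩ | ⟨he2, _⟩
          · exact ⟨i0, G.length, by omega, by omega,
              by rw [he, he2, hseg_last i0 (by omega), hc0]⟩
          · exact ⟨G.length, G.length, le_refl _, by omega,
              by rw [he, he2, hseg_last G.length (le_refl _)]; simp⟩
      · -- upper bound on segment sums
        intro i j hij hj
        rw [hlen] at hj
        rcases Nat.lt_or_ge j G.length with h | h
        · rw [hseg_old i j hij h]
          have := hbub i j hij h
          omega
        · have hj' : j = G.length := by omega
          subst hj'
          rw [hseg_last i hij]
          rcases Nat.lt_or_ge i G.length with h2 | h2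
          · have := hcub i h2
            have : (G.drop i).sum + y ≤ c + y := by omega
            omega
          · have hi' : i = G.length := by omega
            subst hi'
            simp

lemma pvMemBig (arr : List Int) (n v : Int) :
    v ∈ (PySem.List.pyRange 0 n 1).flatMap (fun i =>
        (PySem.List.pyRange i n 1).map (fun j => pvV arr i j))
      ↔ ∃ i j : Int, 0 ≤ i ∧ i ≤ j ∧ j < n ∧ v = pvV arr i j := by
  simp only [List.mem_flatMap, List.mem_map, PySem.List.mem_pyRange_one]
  constructor
  · rintro ⟨i, ⟨hi0, hin⟩, j, ⟨hij, hjn⟩, hv⟩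
    exact ⟨i, j, hi0, hij, hjn, hv.symm⟩
  · rintro ⟨i, j, hi0, hij, hjn, hv⟩
    exact ⟨i, ⟨hi0, by omega⟩, j, ⟨hij, hjn⟩, hv.symm⟩

lemma pvCumSpec (arr : List Int) (n : Int) (harr : arr ≠ []) (hn : 0 ≤ n)
    (hlen : n ≤ (arr.length : Int)) (k : Int) (hk0 : 0 ≤ k) (hkn : k ≤ n) :
    PySem.List.pyGetD
      ((PySem.List.pyRange 1 (n+1) 1).foldl
        (fun c i => PySem.List.pySetD c i
          (PySem.List.pyGetD c (i-1) 0 + PySem.List.pyGetD arr (i-1) 0))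
        (PySem.List.pySetD (List.replicate ((n+1).toNat) (0:Int)) 0 (PySem.List.pyGetD arr 0 0)))
      k 0
    = arr.headD 0 + pvPre arr k.toNat := by
  rw [show PySem.List.pyRange 1 (n+1) 1 = PySem.List.pyRange 1 (1 + ((n.toNat : Nat) : Int)) 1 by
        congr 1; omega]
  conv_lhs => rw [show k = ((k.toNat : Nat) : Int) by omega]
  exact (pvCumAux arr n harr hn hlen n.toNat (by omega)).2 k.toNat (by omega)

lemma pvAeq (arr : List Int) (n : Int) (harr : arr ≠ []) (hn : 0 ≤ n)
    (hlen : n ≤ (arr.length : Int)) :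
    flipping_game arr n =
      ((PySem.List.pyRange 0 n 1).flatMap (fun i =>
        (PySem.List.pyRange i n 1).map (fun j => pvV arr i j))).foldl max 0 := by
  unfold flipping_game
  rw [List.foldl_flatMap]
  apply PySem.List.foldl_congr_mem
  intro m i hi
  rw [PySem.List.mem_pyRange_one] at hi
  rw [List.foldl_map]
  apply PySem.List.foldl_congr_mem
  intro m' j hj
  rw [PySem.List.mem_pyRange_one] at hj
  rw [pvCumSpec arr n harr hn hlen (j+1) (by omega) (by omega),
      pvCumSpec arr n harr hn hlen i (by omega) (by omega)]
  unfold pvV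
  ring_nf

lemma pvBridge (arr : List Int) (n : Int) (hn : 0 ≤ n) (hlen : n ≤ (arr.length : Int))
    (i j : Nat) (hij : i ≤ j) (hj : j < n.toNat) :
    (arr.sum) + pvSeg ((arr.take n.toNat).map (fun x => 1 - 2 * x)) i j
      = pvV arr (i : Int) (j : Int) := by
  have hlenP : (arr.take n.toNat).length = n.toNat := by
    rw [List.length_take]; omega
  unfold pvSeg
  rw [← List.map_drop, ← List.map_take, pvGsum]
  have hlenM : (((arr.take n.toNat).drop i).take (j + 1 - i)).length = j + 1 - i := by
    rw [List.length_take, List.length_drop, hlenP]; omega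
  rw [hlenM, pvSumTakeDrop]
  have ht1 : (arr.take n.toNat).take (i + (j + 1 - i)) = arr.take (j+1) := by
    rw [List.take_take]
    congr 1
    omega
  have ht2 : (arr.take n.toNat).take i = arr.take i := by
    rw [List.take_take]
    congr 1
    omega
  rw [ht1, ht2]
  unfold pvV
  have hj1 : ((j:Int) + 1).toNat = j + 1 := by omega
  have hi1 : ((i:Int)).toNat = i := by omega
  rw [hj1, hi1]
  unfold pvPre
  push_cast [Nat.cast_sub (by omega : i ≤ j + 1)]
  ring


-- ===== VERDICT (by name: the statement is the Claim_ definition above) =====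
theorem flipping_game_spec : Claim_equal_flipping_game := by
  intro arr n _hdom hpre
  obtain ⟨harr, hn, hlen⟩ := hpre
  unfold Spec_flipping_game
  by_cases hn0 : n = 0
  · subst hn0
    simp [flipping_game, flipping_game_alt, PySem.List.pyRange_one_eq_nil (le_refl (0:Int))]
  · have hn1 : 0 < n := by omega
    rw [pvAeq arr n harr hn hlen]
    have hPlen : (arr.take n.toNat).length = n.toNat := by rw [List.length_take]; omega
    have hGlen : ((arr.take n.toNat).map (fun x => 1 - 2*x)).length = n.toNat := by
      rw [List.length_map]; exact hPlen
    have hGne : (arr.take n.toNat).map (fun x => 1 - 2*x) ≠ [] := by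
      intro h
      have := congrArg List.length h
      rw [hGlen] at this
      simp at this
      omega
    obtain ⟨c, b, hcb, -, -, ⟨i1, j1, hij1, hj1, hb1⟩, hbub⟩ :=
      pvKadane ((arr.take n.toNat).map (fun x => 1 - 2*x)) hGne
    have hfold : (PySem.List.pyRange 0 n 1).foldl (fun (s : Int × Option Int) i =>
        let g := 1 - 2 * PySem.List.pyGetD arr i 0
        let cur := max (s.1 + g) g
        (cur, some (match s.2 with | none => cur | some b => max b cur)))
        ((0:Int), (none : Option Int))
        = ((arr.take n.toNat).map (fun x => 1 - 2*x)).foldl pvStep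
            ((0:Int), (none : Option Int)) := by
      have hstep1 : (PySem.List.pyRange 0 n 1).foldl (fun (s : Int × Option Int) i =>
          let g := 1 - 2 * PySem.List.pyGetD arr i 0
          let cur := max (s.1 + g) g
          (cur, some (match s.2 with | none => cur | some b => max b cur)))
          ((0:Int), (none : Option Int))
          = (PySem.List.pyRange 0 n 1).foldl (fun (s : Int × Option Int) i =>
            pvStep s (1 - 2 * PySem.List.pyGetD (arr.take n.toNat) i 0))
          ((0:Int), (none : Option Int)) := by
        apply PySem.List.foldl_congr_mem
        intro s i hi
        rw [PySem.List.mem_pyRange_one] at hi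
        have hilen : i < (arr.length : Int) := by omega
        rw [PySem.List.pyGetD_eq_getElem (arr.take n.toNat) 0 (by omega) (by rw [hPlen]; omega),
            PySem.List.pyGetD_eq_getElem arr 0 (by omega) (by omega),
            List.getElem_take]
        rfl
      rw [hstep1]
      rw [show (PySem.List.pyRange 0 n 1)
            = PySem.List.pyRange 0 (((arr.take n.toNat).length : Nat) : Int) 1 by
          rw [hPlen]; congr 1; omega]
      rw [PySem.List.foldl_pyRange_zero_pyGetD' (arr.take n.toNat) 0
            (fun s x => pvStep s (1 - 2 * x)) ((0:Int), (none : Option Int))]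
      rw [List.foldl_map]
    have hBval : flipping_game_alt arr n = max 0 (arr.sum + b) := by
      unfold flipping_game_alt
      rw [hfold, hcb]
    rw [hBval]
    apply le_antisymm
    · rcases PySem.List.foldl_max_mem ((PySem.List.pyRange 0 n 1).flatMap (fun i =>
        (PySem.List.pyRange i n 1).map (fun j => pvV arr i j))) 0 with h | h
      · rw [h]
        exact le_max_left _ _
      · rw [pvMemBig] at h
        obtain ⟨i, j, hi0, hij, hjn, hv⟩ := h
        rw [hv]
        have hup := hbub i.toNat j.toNat (by omega) (by rw [hGlen]; omega)
        have hbr := pvBridge arr n hn hlen i.toNat j.toNat (by omega) (by omega)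
        rw [Int.toNat_of_nonneg hi0, Int.toNat_of_nonneg (by omega : (0:Int) ≤ j)] at hbr
        have h1 : pvV arr i j ≤ arr.sum + b := by omega
        exact le_trans h1 (le_max_right _ _)
    · apply max_le
      · exact (PySem.List.le_foldl_max _ 0).1
      · have hj1' : j1 < n.toNat := by rw [hGlen] at hj1; exact hj1
        have hbr := pvBridge arr n hn hlen i1 j1 hij1 hj1'
        have hmem : pvV arr (i1 : Int) (j1 : Int) ∈
            (PySem.List.pyRange 0 n 1).flatMap (fun i =>
              (PySem.List.pyRange i n 1).map (fun j => pvV arr i j)) := by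
          rw [pvMemBig]
          exact ⟨(i1 : Int), (j1 : Int), by omega, by omega, by omega, rfl⟩
        have hle := (PySem.List.le_foldl_max _ 0).2 _ hmem
        rw [hb1]
        omega
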